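-- pv_equiv track=rewrite | github.com/jeffseif/aoc2024 | aoc2024/day21.py | accumulate_shortest_values
-- ===== SOURCE A (Python) =====
-- import collections
-- import collections.abc
--
-- def accumulate_shortest_values(it: collections.abc.Iterator[str]) -> list[str]:
--     ret: list[str] = []
--     minimum = float("infinity")
--     for s in it:
--         if (length := len(s)) <= minimum:
--             if length < minimum:
--                 ret.clear()
--             ret.append(s)
--             minimum = length
--     return ret
-- ===== SOURCE B (Python) =====
-- import collections.abc
--
--
-- def accumulate_shortest_values(it: collections.abc.Iterator[str]) -> list[str]:
--     items = list(it)
--     if not items: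
--         return []
--     m = min(len(s) for s in items)
--     return [s for s in items if len(s) == m]
-- ===== Notes on version B (the rewrite author's own statement) =====
-- stated objective: simpler
-- what changed: Replaced the single-pass running-minimum with clear-and-append bookkeeping by a plain two-pass structure: compute the minimum length once, then filter the items of that length (empty input yields an empty result).
import Mathlib
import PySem

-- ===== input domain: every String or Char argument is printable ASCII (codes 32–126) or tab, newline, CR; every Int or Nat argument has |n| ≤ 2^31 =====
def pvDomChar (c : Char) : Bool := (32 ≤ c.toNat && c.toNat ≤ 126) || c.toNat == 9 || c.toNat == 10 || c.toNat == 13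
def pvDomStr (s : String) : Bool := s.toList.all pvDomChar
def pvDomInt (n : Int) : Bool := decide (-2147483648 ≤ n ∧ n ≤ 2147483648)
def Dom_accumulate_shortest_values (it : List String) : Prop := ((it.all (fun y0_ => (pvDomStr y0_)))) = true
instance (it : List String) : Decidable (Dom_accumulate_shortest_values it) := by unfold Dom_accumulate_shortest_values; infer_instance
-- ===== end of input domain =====

-- B replaces A's interleaved running-minimum-with-clear loop by a simpler two-pass structure
-- (compute the minimum length, then filter); same return value for every input.


-- ===== PORT A =====
-- the for-loop over `it` with state (ret, minimum); `minimum = none` is float("infinity")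
def pvLoopA (ret : List String) (minimum : Option Int) : List String → List String
  | [] => ret
  | s :: rest =>
    let length := PySem.Str.len s
    match minimum with
    | none =>
      -- length <= infinity and length < infinity: clear (ret is whatever it was), append, set minimum
      pvLoopA (List.append [] [s]) (some length) rest
    | some m =>
      if length ≤ m then
        if length < m then pvLoopA (List.append [] [s]) (some length) rest
        else pvLoopA (ret ++ [s]) (some m) rest
      else pvLoopA ret (some m) rest

def accumulate_shortest_values (it : List String) : List String :=
  pvLoopA [] none it

-- ===== PORT B =====
def accumulate_shortest_values_alt (it : List String) : List String :=
  match it with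
  | [] => []
  | x :: xs =>
    let m := xs.foldl (fun a s => min a (PySem.Str.len s)) (PySem.Str.len x)
    (x :: xs).filter (fun s => PySem.Str.len s == m)

-- ===== PRECONDITION & SPEC =====
def Spec_accumulate_shortest_values (it : List String) (out : List String) : Prop := out = accumulate_shortest_values_alt it
instance (it : List String) (out : List String) : Decidable (Spec_accumulate_shortest_values it out) := by unfold Spec_accumulate_shortest_values; infer_instance

-- ===== CLAIM (what is proved, stated in full; the proofs are below) =====
def Claim_equal_accumulate_shortest_values : Prop := ∀ (it : List String), Dom_accumulate_shortest_values it → Spec_accumulate_shortest_values it (accumulate_shortest_values it)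

-- ===== LEMMAS AND PROOFS =====

theorem pv_foldl_min_le (xs : List String) (m : Int) :
    xs.foldl (fun a s => min a (PySem.Str.len s)) m ≤ m := by
  induction xs generalizing m with
  | nil => simp
  | cons s rest ih =>
    simp only [List.foldl_cons]
    exact le_trans (ih _) (min_le_left _ _)

-- loop invariant: with current minimum m and collected ret, the loop returns
-- ret (cleared if a strictly smaller length appears) followed by the suffix's minimal-length strings
theorem pvLoopA_spec (xs : List String) (ret : List String) (m : Int) :
    pvLoopA ret (some m) xs =
      (if xs.foldl (fun a s => min a (PySem.Str.len s)) m < m then [] else ret)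
        ++ xs.filter (fun s => PySem.Str.len s == xs.foldl (fun a s => min a (PySem.Str.len s)) m) := by
  induction xs generalizing ret m with
  | nil => simp [pvLoopA]
  | cons s rest ih =>
    simp only [pvLoopA, List.foldl_cons, List.filter_cons]
    by_cases hle : PySem.Str.len s ≤ m
    · by_cases hlt : PySem.Str.len s < m
      · have hmin : min m (PySem.Str.len s) = PySem.Str.len s := min_eq_right hle
        rw [if_pos hle, if_pos hlt, ih]
        simp only [hmin]
        have hF := pv_foldl_min_le rest (PySem.Str.len s)
        by_cases hF' : rest.foldl (fun a s => min a (PySem.Str.len s)) (PySem.Str.len s) < PySem.Str.len s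
        · have hne : ¬ ((PySem.Str.len s == rest.foldl (fun a s => min a (PySem.Str.len s)) (PySem.Str.len s)) = true) := by
            simp only [beq_iff_eq]; omega
          rw [if_pos hF', if_pos (by omega), if_neg hne]
        · have heq : (PySem.Str.len s == rest.foldl (fun a s => min a (PySem.Str.len s)) (PySem.Str.len s)) = true := by
            simp only [beq_iff_eq]; omega
          rw [if_neg hF', if_pos (by omega), if_pos heq]
          simp [List.append]
      · have hEq : PySem.Str.len s = m := le_antisymm hle (by omega)
        have hmin : min m (PySem.Str.len s) = m := by omega
        rw [if_pos hle, if_neg hlt, ih]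
        simp only [hmin]
        have hF := pv_foldl_min_le rest m
        by_cases hF' : rest.foldl (fun a s => min a (PySem.Str.len s)) m < m
        · have hne : ¬ ((PySem.Str.len s == rest.foldl (fun a s => min a (PySem.Str.len s)) m) = true) := by
            simp only [beq_iff_eq]; omega
          rw [if_pos hF', if_pos hF', if_neg hne]
        · have heq : (PySem.Str.len s == rest.foldl (fun a s => min a (PySem.Str.len s)) m) = true := by
            simp only [beq_iff_eq]; omega
          rw [if_neg hF', if_neg hF', if_pos heq]
          simp
    · have hmin : min m (PySem.Str.len s) = m := min_eq_left (by omega)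
      rw [if_neg hle, ih]
      simp only [hmin]
      have hF := pv_foldl_min_le rest m
      have hne : ¬ ((PySem.Str.len s == rest.foldl (fun a s => min a (PySem.Str.len s)) m) = true) := by
        simp only [beq_iff_eq]; omega
      rw [if_neg hne]

-- ===== VERDICT (by name: the statement is the Claim_ definition above) =====
theorem accumulate_shortest_values_spec : Claim_equal_accumulate_shortest_values := by
  intro it _
  unfold Spec_accumulate_shortest_values accumulate_shortest_values accumulate_shortest_values_alt
  match it with
  | [] => simp [pvLoopA]
  | x :: xs =>
    simp only [pvLoopA, List.append, pvLoopA_spec, List.filter_cons]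
    have hF := pv_foldl_min_le xs (PySem.Str.len x)
    by_cases hF' : xs.foldl (fun a s => min a (PySem.Str.len s)) (PySem.Str.len x) < PySem.Str.len x
    · have hne : ¬ ((PySem.Str.len x == xs.foldl (fun a s => min a (PySem.Str.len s)) (PySem.Str.len x)) = true) := by
        simp only [beq_iff_eq]; omega
      rw [if_pos hF', if_neg hne]
      simp
    · have heq : (PySem.Str.len x == xs.foldl (fun a s => min a (PySem.Str.len s)) (PySem.Str.len x)) = true := by
        simp only [beq_iff_eq]; omega
      rw [if_neg hF', if_pos heq]
      simp
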